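-- pv_equiv track=rewrite | github.com/MaferMazu/Sudoku-to-SAT | sat_solver.py | clausule_association
-- ===== SOURCE A (Python) =====
-- def clausule_association(var,clausulas):
--     tam = len(clausulas)
--     asociaciones = []
--     for v in var:
--         aparecio = False
--         clausula_por_variable = []
--         for cl in clausulas:
--             for c in cl:
--                 if ((v in c) or (-v in c)):
--                     aparecio = True
--                     clausula_por_variable.append(c)
--         if(aparecio):
--             asociaciones.append(clausula_por_variable)
--     return asociaciones
-- ===== SOURCE B (Python) =====
-- def clausule_association(var, clausulas):
--     # one pass: index clauses by the absolute value of their literals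
--     groups = {}
--     for cl in clausulas:
--         for c in cl:
--             for a in {abs(l) for l in c}:
--                 groups.setdefault(a, []).append(c)
--     out = []
--     for v in var:
--         g = groups.get(abs(v))
--         if g is not None:
--             out.append(g)
--     return out
-- ===== Notes on version B (the rewrite author's own statement) =====
-- stated objective: alternative
-- what changed: Instead of rescanning every clause for every variable, B makes one pass over the clauses building a dict from abs(literal) to the clauses containing it, then answers each variable by a single dict lookup (intended as the asymptotically better O(total_literals + |var|) strategy; a timing run measured only 1.27x at the largest size, so no speed is claimed).
import Mathlib
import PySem

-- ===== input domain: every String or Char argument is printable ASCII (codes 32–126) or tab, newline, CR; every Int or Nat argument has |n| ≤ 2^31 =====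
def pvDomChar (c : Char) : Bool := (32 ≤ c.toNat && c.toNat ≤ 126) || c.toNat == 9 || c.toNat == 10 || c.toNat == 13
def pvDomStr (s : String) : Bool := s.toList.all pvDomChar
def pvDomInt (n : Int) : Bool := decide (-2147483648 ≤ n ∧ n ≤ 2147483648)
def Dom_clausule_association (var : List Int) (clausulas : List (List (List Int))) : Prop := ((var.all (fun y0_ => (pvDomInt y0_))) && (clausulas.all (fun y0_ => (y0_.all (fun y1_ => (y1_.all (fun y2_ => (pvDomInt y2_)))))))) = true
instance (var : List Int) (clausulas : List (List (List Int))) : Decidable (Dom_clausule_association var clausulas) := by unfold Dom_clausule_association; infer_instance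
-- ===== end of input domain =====

-- B replaces A's scan of all clauses per variable by a single indexing pass: a dict
-- from abs(literal) to its clauses, then one lookup per variable (objective: alternative).

-- ===== PORT A =====
def clausule_association (var : List Int) (clausulas : List (List (List Int))) : List (List (List Int)) :=
  let _tam := clausulas.length
  var.foldl (fun asociaciones v =>
    let st := clausulas.foldl (fun (st : Bool × List (List Int)) cl =>
      cl.foldl (fun st c =>
        if v ∈ c ∨ (-v) ∈ c then (true, st.2 ++ [c]) else st) st) (false, [])
    if st.1 then asociaciones ++ [st.2] else asociaciones) []

-- ===== PORT B =====
-- {abs(l) for l in c}  (a Python set: the distinct absolute values)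
def pvAbsKeys (c : List Int) : PySem.Set Int := PySem.Set.ofList (c.map (fun l => |l|))

-- groups: dict from abs(literal) to the list of clauses containing that variable
def pvGroups (clausulas : List (List (List Int))) : PySem.Dict Int (List (List Int)) :=
  clausulas.foldl (fun d cl =>
    cl.foldl (fun d c =>
      (pvAbsKeys c).foldl (fun d a => d.insert a (d.getD a [] ++ [c])) d) d) PySem.Dict.empty

def clausule_association_alt (var : List Int) (clausulas : List (List (List Int))) : List (List (List Int)) :=
  let groups := pvGroups clausulas
  var.foldl (fun out v =>
    match groups.get? |v| with
    | some g => out ++ [g]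
    | none => out) []

-- ===== PRECONDITION & SPEC =====
def Spec_clausule_association (var : List Int) (clausulas : List (List (List Int))) (out : List (List (List Int))) : Prop := out = clausule_association_alt var clausulas
instance (var : List Int) (clausulas : List (List (List Int))) (out : List (List (List Int))) : Decidable (Spec_clausule_association var clausulas out) := by unfold Spec_clausule_association; infer_instance

-- ===== CLAIM (what is proved, stated in full; the proofs are below) =====
def Claim_equal_clausule_association : Prop := ∀ (var : List Int) (clausulas : List (List (List Int))), Dom_clausule_association var clausulas → Spec_clausule_association var clausulas (clausule_association var clausulas)

-- ===== LEMMAS AND PROOFS =====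

-- A clause matches v iff |v| is among the absolute values of its literals.
lemma pv_match_iff (v : Int) (c : List Int) :
    (v ∈ c ∨ (-v) ∈ c) ↔ |v| ∈ c.map (fun l => |l|) := by
  simp only [List.mem_map]
  constructor
  · rintro (h | h)
    · exact ⟨v, h, rfl⟩
    · exact ⟨-v, h, abs_neg v⟩
  · rintro ⟨l, hl, habs⟩
    rcases abs_eq_abs.mp habs with rfl | rfl
    · exact Or.inl hl
    · exact Or.inr (by simpa using hl)

-- A's inner loop over one clause list, carrying (aparecio, clausula_por_variable).
lemma pv_pairFold_cl (v : Int) (cl : List (List Int)) (st : Bool × List (List Int)) :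
    cl.foldl (fun st c => if v ∈ c ∨ (-v) ∈ c then (true, st.2 ++ [c]) else st) st
      = (st.1 || cl.any (fun c => decide (v ∈ c ∨ (-v) ∈ c)),
         st.2 ++ cl.filter (fun c => decide (v ∈ c ∨ (-v) ∈ c))) := by
  induction cl generalizing st with
  | nil => simp
  | cons c cs ih =>
    by_cases h : v ∈ c ∨ (-v) ∈ c
    · simp [List.foldl_cons, h, ih]
    · push Not at h
      simp [List.foldl_cons, h.1, h.2, ih]

-- A's outer loop over all clause lists, reduced to the flattened clause list.
lemma pv_pairFold (v : Int) (cls : List (List (List Int))) (st : Bool × List (List Int)) :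
    cls.foldl (fun st cl =>
        cl.foldl (fun st c => if v ∈ c ∨ (-v) ∈ c then (true, st.2 ++ [c]) else st) st) st
      = (st.1 || (cls.flatMap (fun x => x)).any (fun c => decide (v ∈ c ∨ (-v) ∈ c)),
         st.2 ++ (cls.flatMap (fun x => x)).filter (fun c => decide (v ∈ c ∨ (-v) ∈ c))) := by
  induction cls generalizing st with
  | nil => simp
  | cons cl cls ih =>
    rw [List.foldl_cons, pv_pairFold_cl, ih]
    simp [List.flatMap_cons, List.any_append, List.filter_append, Bool.or_assoc]

-- The fold inserting one clause under each of its (distinct) keys.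
lemma pv_keyFold (keys : List Int) (h : keys.Nodup)
    (d : PySem.Dict Int (List (List Int))) (c : List Int) (a : Int) :
    (keys.foldl (fun d k => d.insert k (d.getD k [] ++ [c])) d).get? a
      = if a ∈ keys then some (d.getD a [] ++ [c]) else d.get? a := by
  induction keys generalizing d with
  | nil => simp
  | cons k ks ih =>
    rcases List.nodup_cons.mp h with ⟨hk, hks⟩
    rw [List.foldl_cons, ih hks]
    by_cases hak : a = k
    · subst hak
      simp [hk, PySem.Dict.get?_insert_self, PySem.Dict.getD_eq_get?_getD]
    · have hgd : (d.insert k (d.getD k [] ++ [c])).getD a [] = d.getD a [] := by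
        rw [PySem.Dict.getD_insert]; simp [hak]
      simp [hgd, PySem.Dict.get?_insert_of_ne _ _ hak, hak]

-- The whole dict-building pass over a flat clause list, characterised per key.
lemma pv_clauseFold (cs : List (List Int)) (d : PySem.Dict Int (List (List Int))) (a : Int) :
    (cs.foldl (fun d c =>
        (pvAbsKeys c).foldl (fun d k => d.insert k (d.getD k [] ++ [c])) d) d).get? a
      = if cs.any (fun c => decide (a ∈ c.map (fun l => |l|))) then
          some (d.getD a [] ++ cs.filter (fun c => decide (a ∈ c.map (fun l => |l|))))
        else d.get? a := by
  induction cs generalizing d with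
  | nil => simp
  | cons c cs ih =>
    rw [List.foldl_cons, ih]
    have hmem : a ∈ pvAbsKeys c ↔ a ∈ c.map (fun l => |l|) :=
      PySem.Set.mem_ofList _ _
    have hkey := pv_keyFold (pvAbsKeys c) (PySem.Set.nodup_ofList _) d c a
    rw [List.any_cons, List.filter_cons]
    by_cases hc : a ∈ c.map (fun l => |l|)
    · rw [if_pos (hmem.mpr hc)] at hkey
      have hgd : (List.foldl (fun d k => d.insert k (d.getD k [] ++ [c])) d (pvAbsKeys c)).getD a []
          = d.getD a [] ++ [c] := by
        rw [PySem.Dict.getD_eq_get?_getD, hkey]; rfl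
      rw [decide_eq_true hc, Bool.true_or, if_pos rfl, if_pos rfl]
      by_cases hcs : cs.any (fun c => decide (a ∈ c.map (fun l => |l|))) = true
      · rw [if_pos hcs, hgd]
        simp only [List.append_assoc, List.singleton_append]
      · rw [if_neg hcs, hkey]
        have hfil : cs.filter (fun c => decide (a ∈ c.map (fun l => |l|))) = [] :=
          List.filter_eq_nil_iff.mpr (by simpa [List.any_eq_false] using hcs)
        rw [hfil]
    · rw [if_neg (fun h => hc (hmem.mp h))] at hkey
      have hgd : (List.foldl (fun d k => d.insert k (d.getD k [] ++ [c])) d (pvAbsKeys c)).getD a []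
          = d.getD a [] := by
        rw [PySem.Dict.getD_eq_get?_getD, hkey, ← PySem.Dict.getD_eq_get?_getD]
      rw [decide_eq_false hc, Bool.false_or, hgd, hkey]
      simp only [Bool.false_eq_true, if_false]

-- nested foldl over the clause lists = foldl over the flattened clause list
lemma pv_foldl_flat {β : Type} (cls : List (List (List Int))) (f : β → List Int → β) (b : β) :
    cls.foldl (fun b cl => cl.foldl f b) b = (cls.flatMap (fun x => x)).foldl f b := by
  induction cls generalizing b with
  | nil => rfl
  | cons cl cls ih => simp [List.foldl_cons, List.foldl_append, ih]

-- the dict lookup B performs, in terms of the flattened clause list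
lemma pv_groups_get? (clausulas : List (List (List Int))) (a : Int) :
    (pvGroups clausulas).get? a
      = if (clausulas.flatMap (fun x => x)).any (fun c => decide (a ∈ c.map (fun l => |l|))) then
          some ((clausulas.flatMap (fun x => x)).filter (fun c => decide (a ∈ c.map (fun l => |l|))))
        else none := by
  unfold pvGroups
  rw [pv_foldl_flat, pv_clauseFold]
  split_ifs with h
  · rw [PySem.Dict.getD_eq_get?_getD, PySem.Dict.get?_empty]; rfl
  · exact PySem.Dict.get?_empty a

-- ===== VERDICT (by name: the statement is the Claim_ definition above) =====
theorem clausule_association_spec : Claim_equal_clausule_association := by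
  intro var clausulas _
  unfold Spec_clausule_association clausule_association clausule_association_alt
  congr 1
  funext acc v
  rw [pv_pairFold, pv_groups_get?]
  have hp : (fun c : List Int => decide (v ∈ c ∨ (-v) ∈ c))
      = (fun c : List Int => decide (|v| ∈ c.map (fun l => |l|))) := by
    funext c; exact decide_eq_decide.mpr (pv_match_iff v c)
  rw [hp]
  simp only [Bool.false_or, List.nil_append]
  split_ifs <;> rfl
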